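-- pv_equiv track=rewrite | github.com/shaniellehall/FreshmanYear | CS171/HW04_Text_Assistant.py | shortenSpace
-- ===== SOURCE A (Python) =====
-- def shortenSpace(string):
--     index = 0
--     result = ""
--     space = False
--
--     while index < len(string):
--         char = string[index]
--         if char == ' ':
--             if not space:
--                 result = result + char
--                 space = True
--         else:
--             result = result + char
--             space = False
--         index = index + 1
--     return result
-- ===== SOURCE B (Python) =====
-- from itertools import groupby
--
-- def shortenSpace(string):
--     return ''.join(' ' if key == ' ' else ''.join(group)
--                    for key, group in groupby(string))
-- ===== Notes on version B (the rewrite author's own statement) =====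
-- stated objective: idiomatic
-- what changed: Replaces the index loop with a stateful boolean flag by itertools.groupby run-grouping: each maximal run of identical characters is emitted whole, except a run of spaces which becomes a single space, joined once at the end.
import Mathlib
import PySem

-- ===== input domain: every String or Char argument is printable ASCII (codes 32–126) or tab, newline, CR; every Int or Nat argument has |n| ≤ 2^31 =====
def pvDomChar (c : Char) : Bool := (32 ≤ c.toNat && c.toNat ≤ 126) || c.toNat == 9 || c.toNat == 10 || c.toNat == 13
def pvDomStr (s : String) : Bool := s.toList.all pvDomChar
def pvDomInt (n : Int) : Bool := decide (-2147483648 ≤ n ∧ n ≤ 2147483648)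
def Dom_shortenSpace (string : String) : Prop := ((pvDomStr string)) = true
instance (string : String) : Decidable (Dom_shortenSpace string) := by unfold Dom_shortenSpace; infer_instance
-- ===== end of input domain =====

-- B collapses runs of identical characters via groupby instead of A's index loop with a
-- boolean flag; same return value; a timing run measured B faster (A re-concatenates the string).

-- ===== PORT A =====
-- A's while loop: walk the characters in order, appending to `result`, with the flag
-- `space` remembering whether the previous character was a space.
def shortenSpaceGo : List Char → List Char → Bool → List Char
  | [], result, _ => result
  | c :: rest, result, space =>
      if c = ' ' then
        if ¬ space then shortenSpaceGo rest (result ++ [c]) true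
        else shortenSpaceGo rest result true
      else shortenSpaceGo rest (result ++ [c]) false

def shortenSpace (string : String) : String :=
  String.ofList (shortenSpaceGo string.toList [] false)

-- ===== PORT B =====
-- itertools.groupby: split into maximal runs of identical characters.
def pvGroupRuns : List Char → List (List Char)
  | [] => []
  | c :: rest => (c :: rest.takeWhile (· = c)) :: pvGroupRuns (rest.dropWhile (· = c))
termination_by l => l.length
decreasing_by exact Nat.lt_succ_of_le (rest.length_dropWhile_le _)

-- ''.join(' ' if key == ' ' else ''.join(group) for key, group in groupby(string))
def shortenSpace_alt (string : String) : String :=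
  String.ofList ((pvGroupRuns string.toList).flatMap
    (fun run => if run.head? = some ' ' then [' '] else run))

-- ===== PRECONDITION & SPEC =====
def Spec_shortenSpace (string : String) (out : String) : Prop := out = shortenSpace_alt string
instance (string : String) (out : String) : Decidable (Spec_shortenSpace string out) := by unfold Spec_shortenSpace; infer_instance

-- ===== CLAIM (what is proved, stated in full; the proofs are below) =====
def Claim_equal_shortenSpace : Prop := ∀ (string : String), Dom_shortenSpace string → Spec_shortenSpace string (shortenSpace string)

-- ===== LEMMAS AND PROOFS =====

-- Functional spec of the collapse, structured like A but without the accumulator.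
def pvCollapse : List Char → Bool → List Char
  | [], _ => []
  | c :: rest, space =>
      if c = ' ' then
        if ¬ space then c :: pvCollapse rest true else pvCollapse rest true
      else c :: pvCollapse rest false

theorem shortenSpaceGo_eq (cs : List Char) :
    ∀ (res : List Char) (sp : Bool),
      shortenSpaceGo cs res sp = res ++ pvCollapse cs sp := by
  induction cs with
  | nil => intro res sp; simp [shortenSpaceGo, pvCollapse]
  | cons c rest ih =>
      intro res sp
      by_cases hc : c = ' '
      · by_cases hsp : sp <;>
          simp [shortenSpaceGo, pvCollapse, hc, hsp, ih]
      · simp [shortenSpaceGo, pvCollapse, hc, ih]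

-- Skipping a run of spaces when the flag is already set.
theorem pvCollapse_spaces (run : List Char) (h : ∀ x ∈ run, x = ' ') (rest : List Char) :
    pvCollapse (run ++ rest) true = pvCollapse rest true := by
  induction run with
  | nil => rfl
  | cons c cs ih =>
      have hc : c = ' ' := h c (by simp)
      subst hc
      simp [pvCollapse, ih (fun x hx => h x (by simp [hx]))]

-- A non-space run is copied verbatim and leaves the flag cleared.
theorem pvCollapse_nonspaces (run : List Char) (c : Char) (hc : c ≠ ' ')
    (h : ∀ x ∈ run, x = c) (rest : List Char) :
    pvCollapse (run ++ rest) false = run ++ pvCollapse rest false := by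
  induction run with
  | nil => rfl
  | cons d ds ih =>
      have hd : d = c := h d (by simp)
      subst hd
      simp [pvCollapse, hc, ih (fun x hx => h x (by simp [hx]))]

-- If the next character is not a space, the flag does not matter.
theorem pvCollapse_flag (rest : List Char)
    (h : rest.head? ≠ some ' ') : pvCollapse rest true = pvCollapse rest false := by
  cases rest with
  | nil => rfl
  | cons c cs =>
      have hc : c ≠ ' ' := by simpa using h
      simp [pvCollapse, hc]

theorem head_dropWhile_ne (p : Char → Prop) [DecidablePred p] (l : List Char) :
    ∀ c, (l.dropWhile (fun x => decide (p x))).head? = some c → ¬ p c := by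
  induction l with
  | nil => intro c h; simp at h
  | cons a as ih =>
      intro c h
      by_cases ha : p a
      · exact ih c (by simpa [List.dropWhile, ha] using h)
      · simp [List.dropWhile, ha] at h
        subst h; exact ha

theorem pvGroupRuns_flatMap (cs : List Char) :
    (pvGroupRuns cs).flatMap (fun run => if run.head? = some ' ' then [' '] else run)
      = pvCollapse cs false := by
  induction hn : cs.length using Nat.strong_induction_on generalizing cs with
  | _ n ih =>
  cases cs with
  | nil => rw [pvGroupRuns.eq_1]; rfl
  | cons c rest =>
      have hsplit : rest.takeWhile (· = c) ++ rest.dropWhile (· = c) = rest :=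
        List.takeWhile_append_dropWhile
      have hrunmem : ∀ x ∈ rest.takeWhile (· = c), x = c := by
        intro x hx
        simpa using List.mem_takeWhile_imp hx
      have hlen : (rest.dropWhile (· = c)).length < n := by
        subst hn
        exact Nat.lt_succ_of_le (rest.length_dropWhile_le _)
      have ihrest := ih _ hlen (rest.dropWhile (· = c)) rfl
      by_cases hc : c = ' '
      · subst hc
        have hhead : (rest.dropWhile (· = ' ')).head? ≠ some ' ' := by
          intro h
          exact head_dropWhile_ne (fun x => x = ' ') rest ' ' (by simpa using h) rfl
        rw [pvGroupRuns.eq_2]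
        simp only [List.flatMap_cons, List.head?_cons, ihrest]
        have : pvCollapse (' ' :: rest) false
            = ' ' :: pvCollapse rest true := by simp [pvCollapse]
        rw [this]
        have : pvCollapse rest true = pvCollapse (rest.dropWhile (· = ' ')) false := by
          conv_lhs => rw [← hsplit]
          rw [pvCollapse_spaces _ (by simpa using hrunmem)]
          exact pvCollapse_flag _ hhead
        rw [this]
        simp
      · rw [pvGroupRuns.eq_2]
        simp only [List.flatMap_cons, List.head?_cons]
        rw [if_neg (by simpa using hc), ihrest]
        have : pvCollapse (c :: rest) false
            = c :: pvCollapse rest false := by simp [pvCollapse, hc]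
        rw [this]
        conv_rhs => rw [← hsplit]
        rw [pvCollapse_nonspaces _ c hc hrunmem]
        simp

-- ===== VERDICT (by name: the statement is the Claim_ definition above) =====
theorem shortenSpace_spec : Claim_equal_shortenSpace := by
  intro s _
  unfold Spec_shortenSpace shortenSpace shortenSpace_alt
  rw [shortenSpaceGo_eq, pvGroupRuns_flatMap]
  rfl
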